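-- pv_equiv track=rewrite | github.com/utsavukani/kmrl-train-optimization | backend/models/llm_explainer.py | _generate_constraint_analysis
-- ===== SOURCE A (Python) =====
-- from typing import Dict, List, Any, Optional
--
-- def _generate_constraint_analysis(context: Dict) -> str:
--     """Analyze constraint satisfaction and conflicts"""
--
--     constraints_log = context.get('constraints_applied', [])
--     conflicts = context.get('conflicts', [])
--
--     if not constraints_log and not conflicts:
--         return "All operational constraints were satisfied without conflicts."
--
--     analysis_parts = []
--
--     # Safety constraints
--     safety_constraints = [
--         c for c in constraints_log if c.get('type') == 'safety']
--     if safety_constraints: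
--         analysis_parts.append(
--             f"Applied {len(safety_constraints)} safety constraints including fitness certificate validation and critical job card restrictions.")
--
--     # Operational constraints
--     operational_constraints = [
--         c for c in constraints_log if c.get('type') == 'operational']
--     if operational_constraints:
--         analysis_parts.append(
--             f"Enforced {len(operational_constraints)} operational constraints for service levels and crew availability.")
--
--     # Depot constraints
--     depot_constraints = [
--         c for c in constraints_log if c.get('type') == 'depot']
--     if depot_constraints:
--         analysis_parts.append(
--             f"Applied {len(depot_constraints)} depot capacity constraints for bay utilization and stabling geometry.")
--
--     # Conflicts
--     if conflicts:
--         analysis_parts.append(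
--             f"Resolved {len(conflicts)} constraint conflicts through optimization trade-offs.")
--         for conflict in conflicts[:3]:  # Show first 3 conflicts
--             analysis_parts.append(
--                 f"- {conflict.get('message', 'Constraint conflict detected')}")
--
--     return " ".join(analysis_parts)
-- ===== SOURCE B (Python) =====
-- def _generate_constraint_analysis(context):
--     """Analyze constraint satisfaction and conflicts (single-pass count version)"""
--     constraints_log = context.get('constraints_applied', [])
--     conflicts = context.get('conflicts', [])
--
--     if not constraints_log and not conflicts:
--         return "All operational constraints were satisfied without conflicts."
--
--     # One pass over constraints_log: count constraints per type
--     counts = {}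
--     for c in constraints_log:
--         t = c.get('type')
--         counts[t] = counts.get(t, 0) + 1
--
--     parts = []
--     templates = [
--         ('safety', 'Applied ', ' safety constraints including fitness certificate validation and critical job card restrictions.'),
--         ('operational', 'Enforced ', ' operational constraints for service levels and crew availability.'),
--         ('depot', 'Applied ', ' depot capacity constraints for bay utilization and stabling geometry.'),
--     ]
--     for t, pre, suf in templates:
--         n = counts.get(t, 0)
--         if n:
--             parts.append(pre + str(n) + suf)
--
--     if conflicts:
--         parts.append(f"Resolved {len(conflicts)} constraint conflicts through optimization trade-offs.")
--         for conflict in conflicts[:3]: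
--             parts.append(f"- {conflict.get('message', 'Constraint conflict detected')}")
--
--     return " ".join(parts)
-- ===== Notes on version B (the rewrite author's own statement) =====
-- stated objective: alternative
-- what changed: B replaces A's three separate filtered comprehensions over constraints_log with a single counting pass into a dict keyed by c.get('type'), then emits the three sentences by folding over a fixed (type, prefix, suffix) template table; the conflicts block and empty-input early return are unchanged.
import Mathlib
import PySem

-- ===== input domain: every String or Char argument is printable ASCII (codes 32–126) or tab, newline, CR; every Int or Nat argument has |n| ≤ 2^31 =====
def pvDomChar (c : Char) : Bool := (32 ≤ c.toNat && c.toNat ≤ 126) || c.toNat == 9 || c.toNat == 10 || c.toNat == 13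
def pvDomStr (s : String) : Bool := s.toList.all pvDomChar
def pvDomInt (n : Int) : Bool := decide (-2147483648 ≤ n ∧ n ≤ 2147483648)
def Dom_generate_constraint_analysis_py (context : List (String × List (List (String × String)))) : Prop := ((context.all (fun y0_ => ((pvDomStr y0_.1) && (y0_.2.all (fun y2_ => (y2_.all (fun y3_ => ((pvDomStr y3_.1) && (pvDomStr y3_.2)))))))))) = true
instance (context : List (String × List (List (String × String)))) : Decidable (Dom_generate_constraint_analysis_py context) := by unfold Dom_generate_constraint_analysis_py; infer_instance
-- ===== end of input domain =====

-- B builds the per-type counts in ONE pass into a dict and emits the three sentences from a template table,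
-- instead of A's three separate filtered list comprehensions; same wording, order and conflicts block.

-- dict.get(k, dflt) on an association list (first match)
def pvDGetD {α : Type} (d : List (String × α)) (k : String) (dflt : α) : α :=
  ((d.find? (fun p => p.1 == k)).map Prod.snd).getD dflt

-- dict.get(k) on an association list (first match, None if absent)
def pvDGet? (d : List (String × String)) (k : String) : Option String :=
  (d.find? (fun p => p.1 == k)).map Prod.snd

-- ===== PORT A =====
def generate_constraint_analysis_py (context : List (String × List (List (String × String)))) : String :=
  let constraints_log := pvDGetD context "constraints_applied" []
  let conflicts := pvDGetD context "conflicts" []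
  if constraints_log.isEmpty && conflicts.isEmpty then
    "All operational constraints were satisfied without conflicts."
  else
    let analysis_parts : List String := []
    let safety_constraints := constraints_log.filter (fun c => pvDGet? c "type" == some "safety")
    let analysis_parts := if !safety_constraints.isEmpty then
        analysis_parts ++ ["Applied " ++ PySem.Int.toStr (safety_constraints.length : Int) ++ " safety constraints including fitness certificate validation and critical job card restrictions."]
      else analysis_parts
    let operational_constraints := constraints_log.filter (fun c => pvDGet? c "type" == some "operational")
    let analysis_parts := if !operational_constraints.isEmpty then
        analysis_parts ++ ["Enforced " ++ PySem.Int.toStr (operational_constraints.length : Int) ++ " operational constraints for service levels and crew availability."]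
      else analysis_parts
    let depot_constraints := constraints_log.filter (fun c => pvDGet? c "type" == some "depot")
    let analysis_parts := if !depot_constraints.isEmpty then
        analysis_parts ++ ["Applied " ++ PySem.Int.toStr (depot_constraints.length : Int) ++ " depot capacity constraints for bay utilization and stabling geometry."]
      else analysis_parts
    let analysis_parts := if !conflicts.isEmpty then
        (analysis_parts ++ ["Resolved " ++ PySem.Int.toStr (conflicts.length : Int) ++ " constraint conflicts through optimization trade-offs."])
          ++ (PySem.List.slice conflicts none (some 3)).map
               (fun conflict => "- " ++ ((pvDGet? conflict "message").getD "Constraint conflict detected"))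
      else analysis_parts
    PySem.Str.join " " analysis_parts

-- ===== PORT B =====
def generate_constraint_analysis_py_alt (context : List (String × List (List (String × String)))) : String :=
  let constraints_log := pvDGetD context "constraints_applied" []
  let conflicts := pvDGetD context "conflicts" []
  if constraints_log.isEmpty && conflicts.isEmpty then
    "All operational constraints were satisfied without conflicts."
  else
    -- one pass: counts[c.get('type')] += 1
    let counts : PySem.Dict (Option String) Int :=
      constraints_log.foldl (fun d c => d.modify (pvDGet? c "type") 0 (· + 1)) PySem.Dict.empty
    let templates : List (String × String × String) :=
      [("safety", "Applied ", " safety constraints including fitness certificate validation and critical job card restrictions."),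
       ("operational", "Enforced ", " operational constraints for service levels and crew availability."),
       ("depot", "Applied ", " depot capacity constraints for bay utilization and stabling geometry.")]
    let parts := templates.foldl (fun parts tps =>
        let n := counts.getD (some tps.1) 0
        if n ≠ 0 then parts ++ [tps.2.1 ++ PySem.Int.toStr n ++ tps.2.2] else parts) []
    let parts := if !conflicts.isEmpty then
        (parts ++ ["Resolved " ++ PySem.Int.toStr (conflicts.length : Int) ++ " constraint conflicts through optimization trade-offs."])
          ++ (PySem.List.slice conflicts none (some 3)).map
               (fun conflict => "- " ++ ((pvDGet? conflict "message").getD "Constraint conflict detected"))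
      else parts
    PySem.Str.join " " parts

-- ===== PRECONDITION & SPEC =====
def Spec_generate_constraint_analysis_py (context : List (String × List (List (String × String)))) (out : String) : Prop := out = generate_constraint_analysis_py_alt context
instance (context : List (String × List (List (String × String)))) (out : String) : Decidable (Spec_generate_constraint_analysis_py context out) := by unfold Spec_generate_constraint_analysis_py; infer_instance

-- ===== CLAIM (what is proved, stated in full; the proofs are below) =====
def Claim_equal_generate_constraint_analysis_py : Prop := ∀ (context : List (String × List (List (String × String)))), Dom_generate_constraint_analysis_py context → Spec_generate_constraint_analysis_py context (generate_constraint_analysis_py context)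

-- ===== LEMMAS AND PROOFS =====

-- B's one-pass count of a type equals the length of A's filter for that type
theorem pv_counts_eq (xs : List (List (String × String))) (t : String) :
    (xs.foldl (fun d c => d.modify (pvDGet? c "type") 0 (· + 1)) PySem.Dict.empty).getD (some t) 0
      = ((xs.filter (fun c => pvDGet? c "type" == some t)).length : Int) := by
  have h : xs.foldl (fun d c => d.modify (pvDGet? c "type") 0 (· + 1)) PySem.Dict.empty
      = PySem.Dict.counter (xs.map (fun c => pvDGet? c "type")) := by
    rw [PySem.Dict.counter_eq_foldl, List.foldl_map]
  rw [h, PySem.Dict.getD_counter, List.count_eq_countP, List.countP_map]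
  simp [List.countP_eq_length_filter]
  rfl

-- guard translation: B's 'if n:' on an int length is A's 'if not list.isEmpty'
theorem pv_ite_isEmpty {α : Type} (l : List (List (String × String))) (a b : α) :
    (if ((l.length : Int) ≠ 0) then a else b) = (if !l.isEmpty then a else b) := by
  rcases l with _ | t <;> simp
  intro h
  exact absurd h (by omega)

-- ===== VERDICT (by name: the statement is the Claim_ definition above) =====
theorem generate_constraint_analysis_py_spec : Claim_equal_generate_constraint_analysis_py := by
  intro context _
  unfold Spec_generate_constraint_analysis_py generate_constraint_analysis_py generate_constraint_analysis_py_alt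
  simp only [List.foldl_cons, List.foldl_nil, pv_counts_eq, pv_ite_isEmpty]
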